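-- pv_equiv track=rewrite | github.com/XquadZ/2026-1-KTSDE-KCI--experience | 객체탐지_앙상블_모듈/metrics.py | pair_counts
-- ===== SOURCE A (Python) =====
-- from typing import Iterable, Sequence, Tuple
--
-- def pair_counts(miss_a: Sequence[int], miss_b: Sequence[int]) -> Tuple[int, int, int, int]:
--     """
--     두 모델의 미검출 이진 벡터(1: miss, 0: detected)에 대해
--     N11, N10, N01, N00 카운트를 반환.
--     """
--     n11 = n10 = n01 = n00 = 0
--     for a, b in zip(miss_a, miss_b):
--         if a == 1 and b == 1:
--             n11 += 1
--         elif a == 1 and b == 0: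
--             n10 += 1
--         elif a == 0 and b == 1:
--             n01 += 1
--         else:
--             n00 += 1
--     return n11, n10, n01, n00
-- ===== SOURCE B (Python) =====
-- def pair_counts(miss_a, miss_b):
--     pairs = list(zip(miss_a, miss_b))
--     n11 = sum(1 for a, b in pairs if a == 1 and b == 1)
--     n10 = sum(1 for a, b in pairs if a == 1 and b == 0)
--     n01 = sum(1 for a, b in pairs if a == 0 and b == 1)
--     n00 = len(pairs) - n11 - n10 - n01
--     return n11, n10, n01, n00
-- ===== Notes on version B (the rewrite author's own statement) =====
-- stated objective: alternative
-- what changed: Replaces the single stateful loop with four-way branching by three independent countP passes over the zipped pairs, deriving n00 as total minus the other three counts.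
import Mathlib
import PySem

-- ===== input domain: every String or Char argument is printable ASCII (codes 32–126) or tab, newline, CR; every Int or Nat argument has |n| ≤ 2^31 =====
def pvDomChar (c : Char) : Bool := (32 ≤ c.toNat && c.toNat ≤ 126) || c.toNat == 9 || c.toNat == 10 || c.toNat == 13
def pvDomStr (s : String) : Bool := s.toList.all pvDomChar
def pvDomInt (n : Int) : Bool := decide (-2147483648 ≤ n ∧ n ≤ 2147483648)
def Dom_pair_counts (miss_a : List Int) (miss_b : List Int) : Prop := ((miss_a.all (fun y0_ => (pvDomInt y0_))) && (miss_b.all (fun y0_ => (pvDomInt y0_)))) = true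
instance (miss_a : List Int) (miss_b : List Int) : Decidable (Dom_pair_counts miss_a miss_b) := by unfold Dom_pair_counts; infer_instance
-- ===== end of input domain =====

-- B replaces A's single 4-way-branching loop by three independent countP passes over the zipped pairs, deriving n00 by subtraction (objective: alternative decomposition, same cost).


-- ===== PORT A =====
-- Port of A: one fold over the zipped lists carrying (n11, n10, n01, n00).
def pair_counts (miss_a : List Int) (miss_b : List Int) : Int × Int × Int × Int :=
  (List.zip miss_a miss_b).foldl
    (fun s ab =>
      if ab.1 = 1 ∧ ab.2 = 1 then (s.1 + 1, s.2.1, s.2.2.1, s.2.2.2)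
      else if ab.1 = 1 ∧ ab.2 = 0 then (s.1, s.2.1 + 1, s.2.2.1, s.2.2.2)
      else if ab.1 = 0 ∧ ab.2 = 1 then (s.1, s.2.1, s.2.2.1 + 1, s.2.2.2)
      else (s.1, s.2.1, s.2.2.1, s.2.2.2 + 1))
    (0, 0, 0, 0)

-- ===== PORT B =====
-- Port of B: three independent countP passes; n00 by subtraction from the total.
def pair_counts_alt (miss_a : List Int) (miss_b : List Int) : Int × Int × Int × Int :=
  let pairs := List.zip miss_a miss_b
  let n11 : Int := pairs.countP (fun ab => decide (ab.1 = 1 ∧ ab.2 = 1))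
  let n10 : Int := pairs.countP (fun ab => decide (ab.1 = 1 ∧ ab.2 = 0))
  let n01 : Int := pairs.countP (fun ab => decide (ab.1 = 0 ∧ ab.2 = 1))
  let n00 : Int := (pairs.length : Int) - n11 - n10 - n01
  (n11, n10, n01, n00)

-- ===== PRECONDITION & SPEC =====
def Spec_pair_counts (miss_a : List Int) (miss_b : List Int) (out : Int × Int × Int × Int) : Prop := out = pair_counts_alt miss_a miss_b
instance (miss_a : List Int) (miss_b : List Int) (out : Int × Int × Int × Int) : Decidable (Spec_pair_counts miss_a miss_b out) := by unfold Spec_pair_counts; infer_instance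

-- ===== CLAIM (what is proved, stated in full; the proofs are below) =====
def Claim_equal_pair_counts : Prop := ∀ (miss_a : List Int) (miss_b : List Int), Dom_pair_counts miss_a miss_b → Spec_pair_counts miss_a miss_b (pair_counts miss_a miss_b)

-- ===== LEMMAS AND PROOFS =====

-- ===== VERDICT (by name: the statement is the Claim_ definition above) =====
lemma pair_counts_fold (l : List (Int × Int)) (s : Int × Int × Int × Int) :
    l.foldl
      (fun s ab =>
        if ab.1 = 1 ∧ ab.2 = 1 then (s.1 + 1, s.2.1, s.2.2.1, s.2.2.2)
        else if ab.1 = 1 ∧ ab.2 = 0 then (s.1, s.2.1 + 1, s.2.2.1, s.2.2.2)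
        else if ab.1 = 0 ∧ ab.2 = 1 then (s.1, s.2.1, s.2.2.1 + 1, s.2.2.2)
        else (s.1, s.2.1, s.2.2.1, s.2.2.2 + 1)) s
    = (s.1 + (l.countP (fun ab => decide (ab.1 = 1 ∧ ab.2 = 1)) : Int),
       s.2.1 + (l.countP (fun ab => decide (ab.1 = 1 ∧ ab.2 = 0)) : Int),
       s.2.2.1 + (l.countP (fun ab => decide (ab.1 = 0 ∧ ab.2 = 1)) : Int),
       s.2.2.2 + ((l.length : Int)
         - (l.countP (fun ab => decide (ab.1 = 1 ∧ ab.2 = 1)) : Int)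
         - (l.countP (fun ab => decide (ab.1 = 1 ∧ ab.2 = 0)) : Int)
         - (l.countP (fun ab => decide (ab.1 = 0 ∧ ab.2 = 1)) : Int))) := by
  induction l generalizing s with
  | nil => simp
  | cons hd tl ih =>
    simp only [List.foldl_cons, List.countP_cons, List.length_cons]
    rw [ih]
    by_cases h1 : hd.1 = 1 ∧ hd.2 = 1 <;>
      by_cases h2 : hd.1 = 1 ∧ hd.2 = 0 <;>
        by_cases h3 : hd.1 = 0 ∧ hd.2 = 1 <;>
          simp only [h1, h2, h3, if_true, if_false, decide_true, decide_false,
            if_pos, Prod.ext_iff] <;>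
            simp [Prod.ext_iff, h1, h2, h3] <;> push_cast <;> omega

theorem pair_counts_spec : Claim_equal_pair_counts := by
  intro miss_a miss_b _
  unfold Spec_pair_counts pair_counts pair_counts_alt
  rw [pair_counts_fold]
  simp
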